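-- pv_equiv track=rewrite | github.com/GauravJiandaniGJ/mac-rephraser | config.py | parse_inline_tone
-- ===== SOURCE A (Python) =====
-- INLINE_PREFIXES = {
--     "grammar:": "grammar",
--     "fix:": "grammar",
--     "professional:": "professional",
--     "formal:": "professional",
--     "concise:": "concise",
--     "short:": "concise",
--     "friendly:": "friendly",
--     "casual:": "friendly",
-- }
--
-- def parse_inline_tone(text: str) -> tuple[str | None, str]:
--     """
--     Check if text starts with an inline tone prefix.
--     Returns (tone_key, remaining_text) or (None, original_text).
--     """
--     text_lower = text.lower().lstrip()
--     for prefix, tone_key in INLINE_PREFIXES.items():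
--         if text_lower.startswith(prefix):
--             # Find the prefix in original text (case-insensitive position)
--             prefix_end = len(prefix)
--             # Skip whitespace after prefix
--             remaining = text.lstrip()[prefix_end:].lstrip()
--             return tone_key, remaining
--     return None, text
-- ===== SOURCE B (Python) =====
-- TONE_WORDS = {
--     "grammar": "grammar",
--     "fix": "grammar",
--     "professional": "professional",
--     "formal": "professional",
--     "concise": "concise",
--     "short": "concise",
--     "friendly": "friendly",
--     "casual": "friendly",
-- }
--
-- def parse_inline_tone(text: str) -> tuple[str | None, str]:
--     """Parse the token before the first ':' and look it up, instead of scanning all prefixes."""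
--     text_lower = text.lower().lstrip()
--     idx = text_lower.find(":")
--     if idx != -1:
--         tone = TONE_WORDS.get(text_lower[:idx])
--         if tone is not None:
--             return tone, text.lstrip()[idx + 1:].lstrip()
--     return None, text
-- ===== Notes on version B (the rewrite author's own statement) =====
-- stated objective: idiomatic
-- what changed: Replaces the scan over all eight tone prefixes with a single parse: locate the first colon, then look the token before it up in a dict keyed by the bare tone words.
import Mathlib
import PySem

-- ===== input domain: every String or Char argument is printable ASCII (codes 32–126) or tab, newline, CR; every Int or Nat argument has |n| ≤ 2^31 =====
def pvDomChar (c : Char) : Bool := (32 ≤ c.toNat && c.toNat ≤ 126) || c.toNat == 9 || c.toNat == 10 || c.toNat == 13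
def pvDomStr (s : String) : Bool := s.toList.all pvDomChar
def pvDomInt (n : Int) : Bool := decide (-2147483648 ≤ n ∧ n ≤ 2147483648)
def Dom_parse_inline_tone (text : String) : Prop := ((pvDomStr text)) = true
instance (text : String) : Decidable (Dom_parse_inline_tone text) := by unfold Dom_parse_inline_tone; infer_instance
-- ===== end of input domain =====

-- B replaces A's scan over the eight tone prefixes by a single parse: locate the first colon
-- and look the token before it up in a dict keyed by the bare tone words (idiomatic).

-- ===== PORT A =====
def INLINE_PREFIXES : List (String × String) :=
  [("grammar:", "grammar"), ("fix:", "grammar"), ("professional:", "professional"),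
   ("formal:", "professional"), ("concise:", "concise"), ("short:", "concise"),
   ("friendly:", "friendly"), ("casual:", "friendly")]

def pitLoop (text : String) (text_lower : String) : List (String × String) → Option String × String
  | [] => (none, text)
  | (prefix_, tone_key) :: rest =>
    if PySem.Str.startswith text_lower prefix_ then
      (some tone_key,
        PySem.Str.lstrip (PySem.Str.slice (PySem.Str.lstrip text) (some (PySem.Str.len prefix_)) none))
    else pitLoop text text_lower rest

def parse_inline_tone (text : String) : Option String × String :=
  pitLoop text (PySem.Str.lstrip (PySem.Str.lower text)) INLINE_PREFIXES

-- ===== PORT B =====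
def TONE_WORDS : PySem.Dict String String :=
  ⟨[("grammar", "grammar"), ("fix", "grammar"), ("professional", "professional"),
    ("formal", "professional"), ("concise", "concise"), ("short", "concise"),
    ("friendly", "friendly"), ("casual", "friendly")]⟩

def parse_inline_tone_alt (text : String) : Option String × String :=
  let text_lower := PySem.Str.lstrip (PySem.Str.lower text)
  let idx := PySem.Str.find text_lower ":"
  if idx ≠ -1 then
    match PySem.Dict.get? TONE_WORDS (PySem.Str.slice text_lower none (some idx)) with
    | some tone =>
      (some tone, PySem.Str.lstrip (PySem.Str.slice (PySem.Str.lstrip text) (some (idx + 1)) none))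
    | none => (none, text)
  else (none, text)

-- ===== PRECONDITION & SPEC =====
def Spec_parse_inline_tone (text : String) (out : Option String × String) : Prop := out = parse_inline_tone_alt text
instance (text : String) (out : Option String × String) : Decidable (Spec_parse_inline_tone text out) := by unfold Spec_parse_inline_tone; infer_instance

-- ===== CLAIM (what is proved, stated in full; the proofs are below) =====
def Claim_equal_parse_inline_tone : Prop := ∀ (text : String), Dom_parse_inline_tone text → Spec_parse_inline_tone text (parse_inline_tone text)

-- ===== LEMMAS AND PROOFS =====

theorem single_prefix_iff (s : List Char) (a : Char) : [a] <+: s ↔ s.head? = some a := by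
  cases s with
  | nil => simp
  | cons b t => simp [List.cons_prefix_cons, eq_comm]

-- If s starts with w ++ ':' and w is colon-free, the first ':' of s is at index w.length.
theorem find_colon_of_prefix (w s : List Char) (hw : ':' ∉ w)
    (h : (w ++ [':']) <+: s) :
    PySem.Chars.find s [':'] = (w.length : Int) ∧ s.take w.length = w := by
  obtain ⟨r, hr⟩ := h
  subst hr
  have hne : PySem.Chars.find ((w ++ [':']) ++ r) [':'] ≠ -1 := by
    rw [Ne, PySem.Chars.find_eq_neg_one_iff]
    exact fun hc => hc ⟨w, r, by simp⟩
  have hspec := PySem.Chars.findFrom_natCast_spec ((w ++ [':']) ++ r) [':'] 0 (Nat.zero_le _)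
  simp only [Nat.cast_zero, PySem.Chars.findFrom_zero] at hspec
  obtain ⟨h0, hpre, hmin⟩ := hspec hne
  set n := (PySem.Chars.find ((w ++ [':']) ++ r) [':']).toNat with hn
  have hat : [':'] <+: ((w ++ [':']) ++ r).drop w.length := by
    rw [List.append_assoc, List.drop_left]
    exact ⟨r, by simp⟩
  have le1 : n ≤ w.length := by
    by_contra h'
    exact (hmin w.length (Nat.zero_le _) (by omega)) hat
  have le2 : w.length ≤ n := by
    by_contra h'
    rw [Nat.not_le] at h'
    rw [single_prefix_iff, List.head?_drop, List.append_assoc,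
        List.getElem?_append_left h'] at hpre
    exact hw (List.mem_of_getElem? hpre)
  have hnw : n = w.length := le_antisymm le1 le2
  refine ⟨?_, ?_⟩
  · rw [← Int.toNat_of_nonneg h0, ← hn, hnw]
  · rw [List.append_assoc, List.take_left]

-- If the first ':' of s is at index n, then s starts with s.take n ++ ':'.
theorem prefix_of_find_colon (s : List Char) (h : PySem.Chars.find s [':'] ≠ -1) :
    0 ≤ PySem.Chars.find s [':'] ∧
      (s.take (PySem.Chars.find s [':']).toNat ++ [':']) <+: s := by
  have hspec := PySem.Chars.findFrom_natCast_spec s [':'] 0 (Nat.zero_le _)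
  simp only [Nat.cast_zero, PySem.Chars.findFrom_zero] at hspec
  obtain ⟨h0, hpre, -⟩ := hspec h
  obtain ⟨r, hr⟩ := hpre
  refine ⟨h0, r, ?_⟩
  conv_rhs => rw [← List.take_append_drop (PySem.Chars.find s [':']).toNat s, ← hr]
  simp

-- String-level version of find_colon_of_prefix, for a matched prefix p = w ++ ":".
theorem posCase (tl w p : String)
    (hp : p.toList = w.toList ++ [':'])
    (hw : ':' ∉ w.toList)
    (h : PySem.Str.startswith tl p = true) :
    PySem.Str.find tl ":" = (w.toList.length : Int) ∧
      PySem.Str.slice tl none (some (w.toList.length : Int)) = w := by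
  rw [PySem.Str.startswith_eq, PySem.Chars.startswith_iff, hp] at h
  have hcol : (":" : String).toList = [':'] := by decide
  obtain ⟨hf, ht⟩ := find_colon_of_prefix w.toList tl.toList hw h
  refine ⟨by rw [PySem.Str.find_eq, hcol]; exact hf, ?_⟩
  apply String.toList_inj.mp
  rw [PySem.Str.toList_slice, PySem.Chars.slice_eq_listSlice, PySem.List.slice_to_natCast]
  exact ht

-- Evaluation of port B when the token before the first ':' is the key w ↦ t.
theorem alt_eval (text w t : String) (n : Nat)
    (hf : PySem.Str.find (PySem.Str.lstrip (PySem.Str.lower text)) ":" = (n : Int))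
    (hsl : PySem.Str.slice (PySem.Str.lstrip (PySem.Str.lower text)) none (some (n : Int)) = w)
    (hmem : PySem.Dict.get? TONE_WORDS w = some t) :
    parse_inline_tone_alt text
      = (some t, PySem.Str.lstrip (PySem.Str.slice (PySem.Str.lstrip text) (some ((n : Int) + 1)) none)) := by
  unfold parse_inline_tone_alt
  simp only [hf, hsl, hmem]
  rw [if_pos (by omega : (n : Int) ≠ -1)]

-- Evaluation of port B when the token before the first ':' is not a key.
theorem alt_eval_none_key (text w : String) (n : Int)
    (hf : PySem.Str.find (PySem.Str.lstrip (PySem.Str.lower text)) ":" = n)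
    (hsl : PySem.Str.slice (PySem.Str.lstrip (PySem.Str.lower text)) none (some n) = w)
    (hmem : PySem.Dict.get? TONE_WORDS w = none) :
    parse_inline_tone_alt text = (none, text) := by
  unfold parse_inline_tone_alt
  simp only [hf, hsl, hmem]
  split <;> rfl

-- Evaluation of port B when there is no ':' at all.
theorem alt_eval_nocolon (text : String)
    (hf : PySem.Str.find (PySem.Str.lstrip (PySem.Str.lower text)) ":" = -1) :
    parse_inline_tone_alt text = (none, text) := by
  unfold parse_inline_tone_alt
  simp only [hf, ne_eq, not_true_eq_false, if_false]

theorem get?_tone_words_none (k : String)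
    (h1 : "grammar" ≠ k) (h2 : "fix" ≠ k) (h3 : "professional" ≠ k) (h4 : "formal" ≠ k)
    (h5 : "concise" ≠ k) (h6 : "short" ≠ k) (h7 : "friendly" ≠ k) (h8 : "casual" ≠ k) :
    PySem.Dict.get? TONE_WORDS k = none := by
  simp [TONE_WORDS, PySem.Dict.get?, List.find?, beq_eq_false_iff_ne.mpr h1,
    beq_eq_false_iff_ne.mpr h2, beq_eq_false_iff_ne.mpr h3, beq_eq_false_iff_ne.mpr h4,
    beq_eq_false_iff_ne.mpr h5, beq_eq_false_iff_ne.mpr h6, beq_eq_false_iff_ne.mpr h7,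
    beq_eq_false_iff_ne.mpr h8]

-- If the token before tl's first ':' were w, then tl would start with p = w ++ ":".
theorem not_key (tl w p : String) (hp : p.toList = w.toList ++ [':'])
    (hs : PySem.Str.startswith tl p = false)
    (n : Int) (h0 : 0 ≤ n)
    (hpre : (tl.toList.take n.toNat ++ [':']) <+: tl.toList) :
    w ≠ PySem.Str.slice tl none (some n) := by
  intro e
  have hw : w.toList = tl.toList.take n.toNat := by
    rw [e, PySem.Str.toList_slice, PySem.Chars.slice_eq_listSlice, PySem.List.slice_to _ h0]
  have : PySem.Chars.startswith tl.toList p.toList = true := by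
    rw [PySem.Chars.startswith_iff, hp, hw]
    exact hpre
  rw [PySem.Str.startswith_eq, this] at hs
  cases hs

-- One positive case of A's scan: the i-th prefix p = w ++ ":" matches, A's loop has
-- already been reduced to its branch value, and w ↦ t in TONE_WORDS.
theorem agree_pos (text w p t : String)
    (hp : p.toList = w.toList ++ [':']) (hw : ':' ∉ w.toList)
    (h : PySem.Str.startswith (PySem.Str.lstrip (PySem.Str.lower text)) p = true)
    (hmem : PySem.Dict.get? TONE_WORDS w = some t)
    (hlen : PySem.Str.len p = (w.toList.length : Int) + 1)
    (hloop : parse_inline_tone text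
      = (some t, PySem.Str.lstrip (PySem.Str.slice (PySem.Str.lstrip text) (some (PySem.Str.len p)) none))) :
    parse_inline_tone text = parse_inline_tone_alt text := by
  obtain ⟨hf, hsl⟩ := posCase (PySem.Str.lstrip (PySem.Str.lower text)) w p hp hw h
  rw [hloop, alt_eval text w t w.toList.length hf hsl hmem, hlen]

theorem ports_agree (text : String) : parse_inline_tone text = parse_inline_tone_alt text := by
  by_cases h1 : PySem.Str.startswith (PySem.Str.lstrip (PySem.Str.lower text)) "grammar:" = true
  · exact agree_pos text "grammar" "grammar:" "grammar" (by decide) (by decide) h1 rfl (by decide)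
      (by simp only [parse_inline_tone, INLINE_PREFIXES, pitLoop]; rw [if_pos h1])
  by_cases h2 : PySem.Str.startswith (PySem.Str.lstrip (PySem.Str.lower text)) "fix:" = true
  · exact agree_pos text "fix" "fix:" "grammar" (by decide) (by decide) h2 rfl (by decide)
      (by simp only [parse_inline_tone, INLINE_PREFIXES, pitLoop]; rw [if_neg h1, if_pos h2])
  by_cases h3 : PySem.Str.startswith (PySem.Str.lstrip (PySem.Str.lower text)) "professional:" = true
  · exact agree_pos text "professional" "professional:" "professional" (by decide) (by decide) h3 rfl (by decide)
      (by simp only [parse_inline_tone, INLINE_PREFIXES, pitLoop]; rw [if_neg h1, if_neg h2, if_pos h3])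
  by_cases h4 : PySem.Str.startswith (PySem.Str.lstrip (PySem.Str.lower text)) "formal:" = true
  · exact agree_pos text "formal" "formal:" "professional" (by decide) (by decide) h4 rfl (by decide)
      (by simp only [parse_inline_tone, INLINE_PREFIXES, pitLoop]; rw [if_neg h1, if_neg h2, if_neg h3, if_pos h4])
  by_cases h5 : PySem.Str.startswith (PySem.Str.lstrip (PySem.Str.lower text)) "concise:" = true
  · exact agree_pos text "concise" "concise:" "concise" (by decide) (by decide) h5 rfl (by decide)
      (by simp only [parse_inline_tone, INLINE_PREFIXES, pitLoop]; rw [if_neg h1, if_neg h2, if_neg h3, if_neg h4, if_pos h5])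
  by_cases h6 : PySem.Str.startswith (PySem.Str.lstrip (PySem.Str.lower text)) "short:" = true
  · exact agree_pos text "short" "short:" "concise" (by decide) (by decide) h6 rfl (by decide)
      (by simp only [parse_inline_tone, INLINE_PREFIXES, pitLoop]; rw [if_neg h1, if_neg h2, if_neg h3, if_neg h4, if_neg h5, if_pos h6])
  by_cases h7 : PySem.Str.startswith (PySem.Str.lstrip (PySem.Str.lower text)) "friendly:" = true
  · exact agree_pos text "friendly" "friendly:" "friendly" (by decide) (by decide) h7 rfl (by decide)
      (by simp only [parse_inline_tone, INLINE_PREFIXES, pitLoop]; rw [if_neg h1, if_neg h2, if_neg h3, if_neg h4, if_neg h5, if_neg h6, if_pos h7])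
  by_cases h8 : PySem.Str.startswith (PySem.Str.lstrip (PySem.Str.lower text)) "casual:" = true
  · exact agree_pos text "casual" "casual:" "friendly" (by decide) (by decide) h8 rfl (by decide)
      (by simp only [parse_inline_tone, INLINE_PREFIXES, pitLoop]; rw [if_neg h1, if_neg h2, if_neg h3, if_neg h4, if_neg h5, if_neg h6, if_neg h7, if_pos h8])
  -- no prefix matches: A returns (none, text)
  have hA : parse_inline_tone text = (none, text) := by
    simp only [parse_inline_tone, INLINE_PREFIXES, pitLoop]
    rw [if_neg h1, if_neg h2, if_neg h3, if_neg h4, if_neg h5, if_neg h6, if_neg h7, if_neg h8]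
  rw [hA]
  by_cases hf : PySem.Str.find (PySem.Str.lstrip (PySem.Str.lower text)) ":" = -1
  · exact (alt_eval_nocolon text hf).symm
  · -- a colon exists but the token before it is no key
    have hcol : (":" : String).toList = [':'] := by decide
    have hfc : PySem.Chars.find (PySem.Str.lstrip (PySem.Str.lower text)).toList [':'] ≠ -1 := by
      rw [← hcol, ← PySem.Str.find_eq]; exact hf
    obtain ⟨h0, hpre⟩ := prefix_of_find_colon (PySem.Str.lstrip (PySem.Str.lower text)).toList hfc
    have hfeq : PySem.Str.find (PySem.Str.lstrip (PySem.Str.lower text)) ":"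
        = PySem.Chars.find (PySem.Str.lstrip (PySem.Str.lower text)).toList [':'] := by
      rw [PySem.Str.find_eq, hcol]
    rw [← hfeq] at h0 hpre
    refine (alt_eval_none_key text _ _ rfl rfl (get?_tone_words_none _ ?_ ?_ ?_ ?_ ?_ ?_ ?_ ?_)).symm
    · exact not_key _ "grammar" "grammar:" (by decide) (eq_false_of_ne_true h1) _ h0 hpre
    · exact not_key _ "fix" "fix:" (by decide) (eq_false_of_ne_true h2) _ h0 hpre
    · exact not_key _ "professional" "professional:" (by decide) (eq_false_of_ne_true h3) _ h0 hpre
    · exact not_key _ "formal" "formal:" (by decide) (eq_false_of_ne_true h4) _ h0 hpre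
    · exact not_key _ "concise" "concise:" (by decide) (eq_false_of_ne_true h5) _ h0 hpre
    · exact not_key _ "short" "short:" (by decide) (eq_false_of_ne_true h6) _ h0 hpre
    · exact not_key _ "friendly" "friendly:" (by decide) (eq_false_of_ne_true h7) _ h0 hpre
    · exact not_key _ "casual" "casual:" (by decide) (eq_false_of_ne_true h8) _ h0 hpre

-- ===== VERDICT (by name: the statement is the Claim_ definition above) =====
theorem parse_inline_tone_spec : Claim_equal_parse_inline_tone := by
  intro text _
  unfold Spec_parse_inline_tone
  exact ports_agree text
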